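-- pv_equiv track=rewrite | github.com/jareie/Connect4T | Code/ClauseGeneticTsetlin.py | GetTAndS
-- ===== SOURCE A (Python) =====
-- def GetTAndS(clause,bits):
--     Tbits = bits[:int(len(bits)/2)]
--     sbits = bits[int(len(bits)/2):]
--     T = 0
--     s = 0
--     RangeBitsT = len(Tbits)
--     for i in range(RangeBitsT):
--         if Tbits[i] == 1:
--             T += (2**((RangeBitsT-1)-i))
--
--     RangeBitsS = len(sbits)
--     for i in range(RangeBitsS):
--         if sbits[i] == 1:
--             s += (2**((RangeBitsS-1)-i))
--     return [clause,T,s]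
-- ===== SOURCE B (Python) =====
-- def GetTAndS(clause, bits):
--     half = int(len(bits) / 2)
--     def horner(hbits):
--         acc = 0
--         for b in hbits:
--             acc = acc * 2 + (1 if b == 1 else 0)
--         return acc
--     return [clause, horner(bits[:half]), horner(bits[half:])]
-- ===== Notes on version B (the rewrite author's own statement) =====
-- stated objective: simpler
-- what changed: Each half is converted with a single Horner accumulation (acc = acc*2 + bit) over the elements instead of an index loop adding positional powers 2**((n-1)-i).
import Mathlib
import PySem

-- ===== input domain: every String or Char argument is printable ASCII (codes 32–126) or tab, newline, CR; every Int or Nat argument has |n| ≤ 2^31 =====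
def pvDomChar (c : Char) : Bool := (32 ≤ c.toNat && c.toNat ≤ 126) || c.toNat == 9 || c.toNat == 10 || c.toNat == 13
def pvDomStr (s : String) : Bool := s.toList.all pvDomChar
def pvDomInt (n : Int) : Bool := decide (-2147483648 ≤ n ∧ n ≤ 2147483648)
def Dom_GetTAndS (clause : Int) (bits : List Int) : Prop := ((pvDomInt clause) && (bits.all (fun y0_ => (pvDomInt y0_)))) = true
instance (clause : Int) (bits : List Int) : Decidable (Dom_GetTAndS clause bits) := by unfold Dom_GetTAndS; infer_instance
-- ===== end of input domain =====

-- B converts each half with one Horner accumulation (acc = acc*2 + bit) instead of A's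
-- index loop adding positional powers 2**((n-1)-i); objective: simpler, same result.

-- ===== PORT A =====
def GetTAndS (clause : Int) (bits : List Int) : List Int :=
  let Tbits := PySem.List.slice bits none (some ((bits.length : Int) / 2))
  let sbits := PySem.List.slice bits (some ((bits.length : Int) / 2)) none
  let T := (PySem.List.pyRange 0 (Tbits.length : Int) 1).foldl
    (fun acc i => if PySem.List.pyGetD Tbits i 0 = 1
                  then acc + 2 ^ (((Tbits.length : Int) - 1 - i).toNat) else acc) 0
  let s := (PySem.List.pyRange 0 (sbits.length : Int) 1).foldl
    (fun acc i => if PySem.List.pyGetD sbits i 0 = 1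
                  then acc + 2 ^ (((sbits.length : Int) - 1 - i).toNat) else acc) 0
  [clause, T, s]

-- ===== PORT B =====
-- Source B's inner helper `horner`
def pvHorner (l : List Int) : Int :=
  l.foldl (fun acc b => acc * 2 + (if b = 1 then 1 else 0)) 0

def GetTAndS_alt (clause : Int) (bits : List Int) : List Int :=
  let half := bits.length / 2
  [clause, pvHorner (bits.take half), pvHorner (bits.drop half)]

-- ===== PRECONDITION & SPEC =====
def Spec_GetTAndS (clause : Int) (bits : List Int) (out : List Int) : Prop := out = GetTAndS_alt clause bits
instance (clause : Int) (bits : List Int) (out : List Int) : Decidable (Spec_GetTAndS clause bits out) := by unfold Spec_GetTAndS; infer_instance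

-- ===== CLAIM (what is proved, stated in full; the proofs are below) =====
def Claim_equal_GetTAndS : Prop := ∀ (clause : Int) (bits : List Int), Dom_GetTAndS clause bits → Spec_GetTAndS clause bits (GetTAndS clause bits)

-- ===== LEMMAS AND PROOFS =====

/-- Positional-power sum of a bit list, recursive characterisation. -/
def pvPowSum : List Int → Int
  | [] => 0
  | a :: t => (if a = 1 then 2 ^ t.length else 0) + pvPowSum t

theorem pvLoopGen (l : List Int) (acc : Int) :
    (List.range l.length).foldl
      (fun (a : Int) (k : ℕ) => if PySem.List.pyGetD l (k : Int) 0 = 1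
                  then a + 2 ^ (((l.length : Int) - 1 - (k : Int)).toNat) else a) acc
      = acc + pvPowSum l := by
  induction l generalizing acc with
  | nil => simp [pvPowSum]
  | cons a t ih =>
    rw [List.length_cons, List.range_succ_eq_map]
    simp only [List.foldl_cons, List.foldl_map]
    have hfun : (fun (x : Int) (k : ℕ) =>
        if PySem.List.pyGetD (a :: t) ((Nat.succ k : ℕ) : Int) 0 = 1
        then x + 2 ^ ((((t.length + 1 : ℕ) : Int) - 1 - ((Nat.succ k : ℕ) : Int)).toNat) else x)
        = (fun (x : Int) (k : ℕ) =>
        if PySem.List.pyGetD t (k : Int) 0 = 1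
        then x + 2 ^ (((t.length : Int) - 1 - (k : Int)).toNat) else x) := by
      funext x k
      have hg : PySem.List.pyGetD (a :: t) ((Nat.succ k : ℕ) : Int) 0
          = PySem.List.pyGetD t (k : Int) 0 := by simp [PySem.List.pyGetD, PySem.List.pyGet?_cons_succ]
      have he : ((((t.length + 1 : ℕ) : Int)) - 1 - ((Nat.succ k : ℕ) : Int)).toNat
          = (((t.length : Int)) - 1 - (k : Int)).toNat := by omega
      rw [hg, he]
    rw [hfun, ih]
    have h0 : PySem.List.pyGetD (a :: t) ((0 : ℕ) : Int) 0 = a := by simp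
    have he0 : ((((t.length + 1 : ℕ) : Int)) - 1 - ((0 : ℕ) : Int)).toNat = t.length := by omega
    rw [h0, he0]
    simp only [pvPowSum]
    split_ifs <;> ring

theorem pvLoopA_eq (l : List Int) :
    (PySem.List.pyRange 0 (l.length : Int) 1).foldl
      (fun acc i => if PySem.List.pyGetD l i 0 = 1
                    then acc + 2 ^ (((l.length : Int) - 1 - i).toNat) else acc) 0
      = pvPowSum l := by
  rw [PySem.List.pyRange_one]
  have hn : (((l.length : Int)) - 0).toNat = l.length := by omega
  rw [hn, List.foldl_map]
  have hfun : (fun (x : Int) (k : ℕ) =>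
      if PySem.List.pyGetD l ((0 : Int) + (k : Int)) 0 = 1
      then x + 2 ^ (((l.length : Int) - 1 - ((0 : Int) + (k : Int))).toNat) else x)
      = (fun (x : Int) (k : ℕ) =>
      if PySem.List.pyGetD l (k : Int) 0 = 1
      then x + 2 ^ (((l.length : Int) - 1 - (k : Int)).toNat) else x) := by
    funext x k
    rw [zero_add]
  rw [hfun, pvLoopGen, zero_add]

theorem pvHorner_acc (l : List Int) (acc : Int) :
    l.foldl (fun a b => a * 2 + (if b = 1 then 1 else 0)) acc
      = acc * 2 ^ l.length + pvPowSum l := by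
  induction l generalizing acc with
  | nil => simp [pvPowSum]
  | cons a t ih =>
    simp only [List.foldl_cons, List.length_cons, pvPowSum]
    rw [ih]
    split_ifs <;> ring

theorem pvHorner_eq (l : List Int) : pvHorner l = pvPowSum l := by
  have := pvHorner_acc l 0
  simpa [pvHorner] using this

-- ===== VERDICT (by name: the statement is the Claim_ definition above) =====
theorem GetTAndS_spec : Claim_equal_GetTAndS := by
  intro clause bits _
  unfold Spec_GetTAndS GetTAndS GetTAndS_alt
  have hhalf : ((bits.length : Int) / 2) = ((bits.length / 2 : ℕ) : Int) := by
    exact (Int.natCast_div bits.length 2).symm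
  rw [hhalf, PySem.List.slice_to_natCast, PySem.List.slice_from_natCast]
  simp only [pvLoopA_eq, pvHorner_eq]
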